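-- pv_equiv track=rewrite | github.com/charle-k/growerdatabase | kk.py | check_id_number
-- ===== SOURCE A (Python) =====
-- def check_id_number(n):
--     is_clean = True
--     r = ''
--     for p in n:
--         if p not in [' ', '-']:
--             r += p
--     n = r
--     r = ""
--     for p in n:
--         if p not in 'ABCDEFGHIJKLMNOPQRSTUVWXYZ1234567890':
--             is_clean = False
--         else:
--             r += p
--     n = r
--
--     if len(r) == 11:
--         if r[8] not in 'ABCDEFGHIJKLMNOPQRSTUVWXYZ':
--             is_clean = False
--         r = r[0:8] + r[9:12]
--         for p in r:
--             if p not in '1234567890':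
--                 is_clean = False
--     else:
--         is_clean = False
--
--     return is_clean, n
-- ===== SOURCE B (Python) =====
-- def check_id_number(n):
--     # Single pass: validate each kept character against its position as we go.
--     out = []
--     ok = True
--     for c in n:
--         if '0' <= c <= '9' or 'A' <= c <= 'Z':
--             if len(out) == 8:
--                 if not ('A' <= c <= 'Z'):
--                     ok = False
--             else:
--                 if not ('0' <= c <= '9'):
--                     ok = False
--             out.append(c)
--         elif c != ' ' and c != '-':
--             ok = False
--     return ok and len(out) == 11, ''.join(out)
-- ===== Notes on version B (the rewrite author's own statement) =====
-- stated objective: alternative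
-- what changed: Replaces A's three staged passes (strip separators, filter/flag allowed chars, then branch on length 11 with slice-and-rebuild digit checks) by a single pass that validates each kept character against its position (index 8 letter, others digit) as it is appended, finishing with one length test.
import Mathlib
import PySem

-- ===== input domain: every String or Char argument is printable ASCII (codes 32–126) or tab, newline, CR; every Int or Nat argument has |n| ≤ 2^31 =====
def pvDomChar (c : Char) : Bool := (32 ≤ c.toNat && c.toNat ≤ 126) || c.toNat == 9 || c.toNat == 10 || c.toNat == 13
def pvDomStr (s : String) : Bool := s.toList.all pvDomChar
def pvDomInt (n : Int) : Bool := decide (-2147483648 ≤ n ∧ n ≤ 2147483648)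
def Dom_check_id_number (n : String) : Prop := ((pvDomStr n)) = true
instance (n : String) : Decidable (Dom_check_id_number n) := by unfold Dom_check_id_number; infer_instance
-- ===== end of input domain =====

-- B replaces A's three staged passes by a single pass validating each kept character
-- against its position as it is appended (alternative decomposition, same cost).

-- ===== PORT A =====
-- literal transliteration of A: two foldl loops building strings char by char while maintaining
-- the is_clean flag, then the length-11 branch with the r[8] check and the digit scan over r[0:8]+r[9:12]
def check_id_number (n : String) : Bool × String :=
  let r1 : List Char := n.toList.foldl
    (fun r p => if !([' ', '-'].contains p) then r ++ [p] else r) []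
  let st : Bool × List Char := r1.foldl
    (fun (st : Bool × List Char) p =>
      if !("ABCDEFGHIJKLMNOPQRSTUVWXYZ1234567890".toList.contains p) then (false, st.2)
      else (st.1, st.2 ++ [p]))
    (true, ([] : List Char))
  let isClean := st.1
  let r := st.2
  if r.length = 11 then
    let isClean2 := if !("ABCDEFGHIJKLMNOPQRSTUVWXYZ".toList.contains (r.getD 8 ' ')) then false else isClean
    let r3 := r.take 8 ++ (r.drop 9).take 3       -- r[0:8] + r[9:12]
    let isClean3 := r3.foldl
      (fun ic p => if !("1234567890".toList.contains p) then false else ic) isClean2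
    (isClean3, String.mk r)
  else (false, String.mk r)

-- ===== PORT B =====
def digitB (c : Char) : Bool := '0' ≤ c && c ≤ '9'
def upperB (c : Char) : Bool := 'A' ≤ c && c ≤ 'Z'

-- B's single-pass step: on an allowed char, check it against its position (current out length) and append;
-- spaces/dashes are skipped; anything else clears the flag
def stepB (st : Bool × List Char) (c : Char) : Bool × List Char :=
  if digitB c || upperB c then
    (if st.2.length = 8 then
       (if !(upperB c) then (false, st.2 ++ [c]) else (st.1, st.2 ++ [c]))
     else
       (if !(digitB c) then (false, st.2 ++ [c]) else (st.1, st.2 ++ [c])))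
  else if c ≠ ' ' ∧ c ≠ '-' then (false, st.2)
  else st

def check_id_number_alt (n : String) : Bool × String :=
  let st := n.toList.foldl stepB (true, [])
  (st.1 && (st.2.length == 11), String.mk st.2)

-- ===== PRECONDITION & SPEC =====
def Spec_check_id_number (n : String) (out : Bool × String) : Prop := out = check_id_number_alt n
instance (n : String) (out : Bool × String) : Decidable (Spec_check_id_number n out) := by unfold Spec_check_id_number; infer_instance

-- ===== CLAIM (what is proved, stated in full; the proofs are below) =====
def Claim_equal_check_id_number : Prop := ∀ (n : String), Dom_check_id_number n → Spec_check_id_number n (check_id_number n)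

-- ===== LEMMAS AND PROOFS =====

-- positional format check: index 8 must be a letter, every other index a digit
def posCheck : Nat → List Char → Bool
  | _, [] => true
  | i, c :: cs => (if i = 8 then upperB c else digitB c) && posCheck (i + 1) cs

theorem contains_allowed (c : Char) :
    ("ABCDEFGHIJKLMNOPQRSTUVWXYZ1234567890".toList.contains c) = (digitB c || upperB c) := by
  have h : "ABCDEFGHIJKLMNOPQRSTUVWXYZ1234567890".toList = ['A','B','C','D','E','F','G','H','I','J','K','L','M','N','O','P','Q','R','S','T','U','V','W','X','Y','Z','1','2','3','4','5','6','7','8','9','0'] := by decide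
  rw [h, Bool.eq_iff_iff]
  simp only [digitB, upperB, List.contains_cons, List.contains_nil, Bool.or_false,
    Bool.or_eq_true, Bool.and_eq_true, beq_iff_eq, decide_eq_true_eq, Char.le_def,
    Char.ext_iff, UInt32.le_iff_toNat_le, ← UInt32.toNat_inj, show ('A' : Char).val.toNat = 65 from rfl, show ('B' : Char).val.toNat = 66 from rfl, show ('C' : Char).val.toNat = 67 from rfl, show ('D' : Char).val.toNat = 68 from rfl, show ('E' : Char).val.toNat = 69 from rfl, show ('F' : Char).val.toNat = 70 from rfl, show ('G' : Char).val.toNat = 71 from rfl, show ('H' : Char).val.toNat = 72 from rfl, show ('I' : Char).val.toNat = 73 from rfl, show ('J' : Char).val.toNat = 74 from rfl, show ('K' : Char).val.toNat = 75 from rfl, show ('L' : Char).val.toNat = 76 from rfl, show ('M' : Char).val.toNat = 77 from rfl, show ('N' : Char).val.toNat = 78 from rfl, show ('O' : Char).val.toNat = 79 from rfl, show ('P' : Char).val.toNat = 80 from rfl, show ('Q' : Char).val.toNat = 81 from rfl, show ('R' : Char).val.toNat = 82 from rfl, show ('S' : Char).val.toNat = 83 from rfl, show ('T' : Char).val.toNat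 = 84 from rfl, show ('U' : Char).val.toNat = 85 from rfl, show ('V' : Char).val.toNat = 86 from rfl, show ('W' : Char).val.toNat = 87 from rfl, show ('X' : Char).val.toNat = 88 from rfl, show ('Y' : Char).val.toNat = 89 from rfl, show ('Z' : Char).val.toNat = 90 from rfl, show ('1' : Char).val.toNat = 49 from rfl, show ('2' : Char).val.toNat = 50 from rfl, show ('3' : Char).val.toNat = 51 from rfl, show ('4' : Char).val.toNat = 52 from rfl, show ('5' : Char).val.toNat = 53 from rfl, show ('6' : Char).val.toNat = 54 from rfl, show ('7' : Char).val.toNat = 55 from rfl, show ('8' : Char).val.toNat = 56 from rfl, show ('9' : Char).val.toNat = 57 from rfl, show ('0' : Char).val.toNat = 48 from rfl]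
  omega

theorem contains_upper (c : Char) :
    ("ABCDEFGHIJKLMNOPQRSTUVWXYZ".toList.contains c) = upperB c := by
  have h : "ABCDEFGHIJKLMNOPQRSTUVWXYZ".toList = ['A','B','C','D','E','F','G','H','I','J','K','L','M','N','O','P','Q','R','S','T','U','V','W','X','Y','Z'] := by decide
  rw [h, Bool.eq_iff_iff]
  simp only [upperB, List.contains_cons, List.contains_nil, Bool.or_false,
    Bool.or_eq_true, Bool.and_eq_true, beq_iff_eq, decide_eq_true_eq, Char.le_def,
    Char.ext_iff, UInt32.le_iff_toNat_le, ← UInt32.toNat_inj, show ('A' : Char).val.toNat = 65 from rfl, show ('B' : Char).val.toNat = 66 from rfl, show ('C' : Char).val.toNat = 67 from rfl, show ('D' : Char).val.toNat = 68 from rfl, show ('E' : Char).val.toNat = 69 from rfl, show ('F' : Char).val.toNat = 70 from rfl, show ('G' : Char).val.toNat = 71 from rfl, show ('H' : Char).val.toNat = 72 from rfl, show ('I' : Char).val.toNat = 73 from rfl, show ('J' : Char).val.toNat = 74 from rfl, show ('K' : Char).val.toNat = 75 from rfl, show ('L' : Char).val.toNat = 76 from rfl, show ('M' : Char).val.toNat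 = 77 from rfl, show ('N' : Char).val.toNat = 78 from rfl, show ('O' : Char).val.toNat = 79 from rfl, show ('P' : Char).val.toNat = 80 from rfl, show ('Q' : Char).val.toNat = 81 from rfl, show ('R' : Char).val.toNat = 82 from rfl, show ('S' : Char).val.toNat = 83 from rfl, show ('T' : Char).val.toNat = 84 from rfl, show ('U' : Char).val.toNat = 85 from rfl, show ('V' : Char).val.toNat = 86 from rfl, show ('W' : Char).val.toNat = 87 from rfl, show ('X' : Char).val.toNat = 88 from rfl, show ('Y' : Char).val.toNat = 89 from rfl, show ('Z' : Char).val.toNat = 90 from rfl]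
  omega

theorem contains_digit (c : Char) :
    ("1234567890".toList.contains c) = digitB c := by
  have h : "1234567890".toList = ['1','2','3','4','5','6','7','8','9','0'] := by decide
  rw [h, Bool.eq_iff_iff]
  simp only [digitB, List.contains_cons, List.contains_nil, Bool.or_false,
    Bool.or_eq_true, Bool.and_eq_true, beq_iff_eq, decide_eq_true_eq, Char.le_def,
    Char.ext_iff, UInt32.le_iff_toNat_le, ← UInt32.toNat_inj, show ('1' : Char).val.toNat = 49 from rfl, show ('2' : Char).val.toNat = 50 from rfl, show ('3' : Char).val.toNat = 51 from rfl, show ('4' : Char).val.toNat = 52 from rfl, show ('5' : Char).val.toNat = 53 from rfl, show ('6' : Char).val.toNat = 54 from rfl, show ('7' : Char).val.toNat = 55 from rfl, show ('8' : Char).val.toNat = 56 from rfl, show ('9' : Char).val.toNat = 57 from rfl, show ('0' : Char).val.toNat = 48 from rfl]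
  omega

-- allowed chars are neither space nor dash
theorem allowed_not_sep (c : Char) (h : (digitB c || upperB c) = true) : c ≠ ' ' ∧ c ≠ '-' := by
  simp only [digitB, upperB, Bool.or_eq_true, Bool.and_eq_true, decide_eq_true_eq, Char.le_def,
    UInt32.le_iff_toNat_le] at h
  constructor <;> rintro rfl <;> revert h <;> decide

-- A's step lambdas with the string-membership tests rewritten pointwise
theorem stepSD_eq : (fun (r : List Char) (p : Char) => if !([' ', '-'].contains p) then r ++ [p] else r)
    = (fun r p => if !(p == ' ' || p == '-') then r ++ [p] else r) := by
  funext r p; simp [List.contains_cons]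

theorem stepAllowed_eq : (fun (st : Bool × List Char) (p : Char) =>
      if !("ABCDEFGHIJKLMNOPQRSTUVWXYZ1234567890".toList.contains p) then (false, st.2)
      else (st.1, st.2 ++ [p]))
    = (fun st p => if !(digitB p || upperB p) then (false, st.2) else (st.1, st.2 ++ [p])) := by
  funext st p; rw [contains_allowed]

theorem stepDigit_eq : (fun (ic : Bool) (p : Char) => if !("1234567890".toList.contains p) then false else ic)
    = (fun ic p => if !(digitB p) then false else ic) := by
  funext ic p; rw [contains_digit]

-- A's second loop computes (flag && all-allowed, acc ++ filter allowed)
theorem foldA2 (l : List Char) (b : Bool) (acc : List Char) :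
    l.foldl (fun (st : Bool × List Char) p =>
        if !(digitB p || upperB p) then (false, st.2) else (st.1, st.2 ++ [p])) (b, acc)
      = (b && l.all (fun c => digitB c || upperB c),
         acc ++ l.filter (fun c => digitB c || upperB c)) := by
  induction l generalizing b acc with
  | nil => simp
  | cons c l ih =>
    simp only [List.foldl_cons]
    by_cases h : (digitB c || upperB c) = true
    · rw [if_neg (by simp [h]), ih, List.all_cons, List.filter_cons, h]
      simp
    · have h' : (digitB c || upperB c) = false := by simpa using h
      rw [if_pos (by simp [h']), ih, List.all_cons, List.filter_cons, h']
      simp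

-- A's final digit loop computes flag && all-digit
theorem foldA3 (l : List Char) (b : Bool) :
    l.foldl (fun ic p => if !(digitB p) then false else ic) b = (b && l.all digitB) := by
  induction l generalizing b with
  | nil => simp
  | cons c l ih =>
    simp only [List.foldl_cons]
    by_cases h : digitB c = true
    · rw [if_neg (by simp [h]), ih, List.all_cons, h, Bool.true_and]
    · have h' : digitB c = false := by simpa using h
      rw [if_pos (by simp [h']), ih, List.all_cons, h']
      simp

-- A's is_clean flag after the two loops equals one all() over the original string
theorem all_filter_eq (l : List Char) :
    (l.filter (fun p => !(p == ' ' || p == '-'))).all (fun c => digitB c || upperB c)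
      = l.all (fun c => c == ' ' || c == '-' || digitB c || upperB c) := by
  induction l with
  | nil => rfl
  | cons c l ih =>
    simp only [List.filter_cons, List.all_cons]
    cases h2 : (c == ' ') <;> cases h3 : (c == '-') <;>
      simp [h2, h3, List.all_cons, ih, Bool.or_assoc]

theorem filter_absorb (l : List Char) :
    (l.filter (fun p => !(p == ' ' || p == '-'))).filter (fun c => digitB c || upperB c)
      = l.filter (fun c => digitB c || upperB c) := by
  rw [List.filter_filter]
  apply List.filter_congr
  intro c _
  by_cases h : (digitB c || upperB c) = true
  · obtain ⟨h1, h2⟩ := allowed_not_sep c h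
    simp [h, h1, h2]
  · simp [Bool.eq_false_iff.mpr h]

-- B's fold computes (flag, out) where flag = start flag && clean && positional check of the kept chars
theorem foldB (l : List Char) (b : Bool) (acc : List Char) :
    l.foldl stepB (b, acc)
      = (b && l.all (fun c => c == ' ' || c == '-' || digitB c || upperB c)
           && posCheck acc.length (l.filter (fun c => digitB c || upperB c)),
         acc ++ l.filter (fun c => digitB c || upperB c)) := by
  induction l generalizing b acc with
  | nil => simp [posCheck]
  | cons c l ih =>
    simp only [List.foldl_cons, List.all_cons, List.filter_cons]
    by_cases h : (digitB c || upperB c) = true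
    · obtain ⟨h1, h2⟩ := allowed_not_sep c h
      have hstep : stepB (b, acc) c
          = (b && (if acc.length = 8 then upperB c else digitB c), acc ++ [c]) := by
        simp only [stepB, h, if_pos]
        split_ifs with h8 hu hd <;> simp_all
      rw [hstep, ih, if_pos h]
      simp only [posCheck, List.length_append, List.length_cons, List.length_nil, Nat.zero_add,
        List.append_assoc, List.cons_append, List.nil_append]
      have hcu : digitB c = true ∨ upperB c = true := by simpa using h
      cases b <;> cases hif : (if acc.length = 8 then upperB c else digitB c) <;>
        simp [h1, h2, h, hcu, Bool.and_assoc, Bool.and_comm, Bool.and_left_comm]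
    · have h' : (digitB c || upperB c) = false := by simpa using h
      by_cases hs : c = ' ' ∨ c = '-'
      · have hstep : stepB (b, acc) c = (b, acc) := by
          rcases hs with rfl | rfl <;> simp [stepB, h'] <;> decide
        rw [hstep, ih, h']
        rcases hs with rfl | rfl <;> simp
      · push_neg at hs
        have hstep : stepB (b, acc) c = (false, acc) := by
          simp [stepB, h', hs.1, hs.2]
        have hsep : (c == ' ' || c == '-' || digitB c || upperB c) = false := by
          simp [beq_eq_false_iff_ne.mpr hs.1, beq_eq_false_iff_ne.mpr hs.2, h']
        rw [hstep, ih, if_neg (by simp [h']), hsep]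
        simp

-- for a length-11 list the positional check is exactly A's take/getD/drop combination
theorem posCheck_len11 (l : List Char) (h : l.length = 11) :
    posCheck 0 l
      = ((l.take 8 ++ l.drop 9).all digitB && upperB (l.getD 8 ' ')) := by
  match l, h with
  | [a,b,c,d,e,f,g,h',i,j,k], _ =>
    simp only [posCheck, List.take, List.drop, List.all_cons, List.all_nil, List.all_append,
      List.getD, List.getElem?_cons_succ, List.getElem?_cons_zero, Option.getD_some,
      show ((0:Nat) = 8) = False by simp, show ((1:Nat) = 8) = False by simp,
      show ((2:Nat) = 8) = False by simp, show ((3:Nat) = 8) = False by simp,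
      show ((4:Nat) = 8) = False by simp, show ((5:Nat) = 8) = False by simp,
      show ((6:Nat) = 8) = False by simp, show ((7:Nat) = 8) = False by simp,
      show ((8:Nat) = 8) = True by simp, show ((9:Nat) = 8) = False by simp,
      show ((10:Nat) = 8) = False by simp, if_true, if_false]
    cases digitB a <;> cases digitB b <;> cases digitB c <;> cases digitB d <;>
      cases digitB e <;> cases digitB f <;> cases digitB g <;> cases digitB h' <;>
      cases upperB i <;> cases digitB j <;> cases digitB k <;> rfl

-- ===== VERDICT (by name: the statement is the Claim_ definition above) =====
theorem check_id_number_spec : Claim_equal_check_id_number := by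
  intro n _
  unfold Spec_check_id_number check_id_number check_id_number_alt
  dsimp only
  rw [stepSD_eq, stepAllowed_eq, stepDigit_eq, PySem.List.foldl_append_if_eq_filter,
      List.nil_append, foldA2, List.nil_append, foldB, List.nil_append,
      filter_absorb, all_filter_eq, contains_upper]
  dsimp only [List.length_nil, Bool.true_and]
  set l := n.toList with hl
  set cleaned := l.filter (fun c => digitB c || upperB c) with hcl
  set b1 := l.all (fun c => c == ' ' || c == '-' || digitB c || upperB c) with hb1
  by_cases hlen : cleaned.length = 11
  · rw [if_pos hlen]
    have hdrop : ((cleaned.drop 9).take 3) = cleaned.drop 9 := by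
      apply List.take_of_length_le
      simp [hlen]
    rw [hdrop, foldA3, posCheck_len11 cleaned hlen]
    simp only [hlen, beq_self_eq_true, Bool.and_true]
    cases b1 <;> cases (cleaned.take 8 ++ cleaned.drop 9).all digitB <;>
      cases upperB (cleaned.getD 8 ' ') <;> simp
  · rw [if_neg hlen]
    have h11 : (cleaned.length == 11) = false := by simpa using hlen
    simp [h11]
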